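-- pv_equiv track=rewrite | github.com/MaesterPycoder/Python_Programming_Language | code list2/prapro025.py | bool_fun
-- ===== SOURCE A (Python) =====
-- def bool_fun(s):
--     one=0
--     zero=0
--     for i in range(len(s)-1,-1,-1):
--         if s[i] is '0':
--             zero+=1
--         else:
--             one+=1
--         if zero > one:
--             return False
--     return True
-- ===== SOURCE B (Python) =====
-- def bool_fun(s):
--     total = sum(1 if c == '0' else -1 for c in s)
--     prefix = 0
--     for c in s:
--         if total - prefix > 0:
--             return False
--         prefix += 1 if c == '0' else -1
--     return True
-- ===== Notes on version B (the rewrite author's own statement) =====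
-- stated objective: alternative
-- what changed: Replaces A's reverse scan with two running counters by a forward scan: B precomputes the total +1/-1 balance, then walks left-to-right keeping a prefix balance so each suffix's zero-surplus is total - prefix.
import Mathlib
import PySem

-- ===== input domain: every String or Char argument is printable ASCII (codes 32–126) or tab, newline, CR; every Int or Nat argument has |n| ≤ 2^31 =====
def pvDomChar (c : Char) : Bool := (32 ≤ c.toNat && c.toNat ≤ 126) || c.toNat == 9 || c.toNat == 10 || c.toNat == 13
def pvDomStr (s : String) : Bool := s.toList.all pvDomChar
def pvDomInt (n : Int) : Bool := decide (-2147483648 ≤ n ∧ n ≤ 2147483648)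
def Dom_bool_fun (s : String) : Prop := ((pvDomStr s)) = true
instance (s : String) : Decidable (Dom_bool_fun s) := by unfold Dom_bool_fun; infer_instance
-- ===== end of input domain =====

-- B replaces A's reverse scan with two counters by a forward scan using a precomputed
-- total balance (alternative decomposition; same O(n) cost).


-- ===== PORT A =====
-- A walks the string from the last character to the first (here: over the reversed
-- character list), counting zeros and ones, returning False as soon as zero > one.
def loopA : List Char → Int → Int → Bool
  | [], _, _ => true
  | c :: rest, one, zero =>
    let one' := if c = '0' then one else one + 1
    let zero' := if c = '0' then zero + 1 else zero
    if zero' > one' then false else loopA rest one' zero'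

def bool_fun (s : String) : Bool := loopA s.toList.reverse 0 0

-- ===== PORT B =====
def pvDelta (c : Char) : Int := if c = '0' then 1 else -1

def loopB (total : Int) : List Char → Int → Bool
  | [], _ => true
  | c :: rest, pfx => if total - pfx > 0 then false else loopB total rest (pfx + pvDelta c)

def bool_fun_alt (s : String) : Bool :=
  loopB ((s.toList.map pvDelta).sum) s.toList 0

-- ===== PRECONDITION & SPEC =====
def Spec_bool_fun (s : String) (out : Bool) : Prop := out = bool_fun_alt s
instance (s : String) (out : Bool) : Decidable (Spec_bool_fun s out) := by unfold Spec_bool_fun; infer_instance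

-- ===== CLAIM (what is proved, stated in full; the proofs are below) =====
def Claim_equal_bool_fun : Prop := ∀ (s : String), Dom_bool_fun s → Spec_bool_fun s (bool_fun s)

-- ===== LEMMAS AND PROOFS =====

def pvDsum (l : List Char) : Int := (l.map pvDelta).sum

-- A's loop depends on its counters only through zero - one.
def loopA' : List Char → Int → Bool
  | [], _ => true
  | c :: rest, d =>
    let d' := d + pvDelta c
    if d' > 0 then false else loopA' rest d'

theorem loopA_eq_loopA' : ∀ (r : List Char) (one zero : Int),
    loopA r one zero = loopA' r (zero - one) := by
  intro r
  induction r with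
  | nil => intro one zero; rfl
  | cons c rest ih =>
    intro one zero
    simp only [loopA, loopA']
    by_cases h : c = '0'
    · simp only [pvDelta, if_pos h]
      by_cases h3 : zero + 1 > one
      · rw [if_pos h3, if_pos (by omega : zero - one + 1 > 0)]
      · rw [if_neg h3, if_neg (by omega : ¬ zero - one + 1 > 0), ih]
        congr 1; omega
    · simp only [pvDelta, if_neg h]
      by_cases h3 : zero > one + 1
      · rw [if_pos h3, if_pos (by omega : zero - one + -1 > 0)]
      · rw [if_neg h3, if_neg (by omega : ¬ zero - one + -1 > 0), ih]
        congr 1; omega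

theorem loopA'_append : ∀ (xs ys : List Char) (d : Int),
    loopA' (xs ++ ys) d = (loopA' xs d && loopA' ys (d + pvDsum xs)) := by
  intro xs
  induction xs with
  | nil => intro ys d; simp [loopA', pvDsum]
  | cons c rest ih =>
    intro ys d
    simp only [List.cons_append, loopA']
    by_cases h : d + pvDelta c > 0
    · simp [h]
    · simp only [h]
      rw [ih]
      simp [pvDsum]; ring_nf

theorem charA : ∀ (l : List Char) (d : Int),
    (loopA' l.reverse d = true ↔ ∀ j, j < l.length → d + pvDsum (l.drop j) ≤ 0) := by
  intro l
  induction l with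
  | nil => intro d; simp [loopA']
  | cons c rest ih =>
    intro d
    rw [List.reverse_cons, loopA'_append]
    have hsingle : ∀ x : Int, loopA' [c] x = true ↔ x + pvDelta c ≤ 0 := by
      intro x
      simp only [loopA']
      by_cases h : x + pvDelta c > 0 <;> simp [h]; omega
    constructor
    · intro h j hj
      rw [Bool.and_eq_true] at h
      rcases h with ⟨h1, h2⟩
      rw [hsingle] at h2
      rw [pvDsum, List.map_reverse, List.sum_reverse] at h2
      match j with
      | 0 =>
        simp only [List.drop_zero, pvDsum, List.map_cons, List.sum_cons]
        omega
      | j + 1 =>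
        simp only [List.drop_succ_cons]
        exact (ih d).mp h1 j (by simpa using hj)
    · intro h
      rw [Bool.and_eq_true]
      refine ⟨(ih d).mpr fun j hj => ?_, ?_⟩
      · have := h (j + 1) (by simpa using hj)
        simpa using this
      · rw [hsingle, pvDsum, List.map_reverse, List.sum_reverse]
        have := h 0 (by simp)
        simp only [List.drop_zero, pvDsum, List.map_cons, List.sum_cons] at this
        omega

theorem charB : ∀ (cs : List Char) (pfx T : Int), T - pfx = pvDsum cs →
    (loopB T cs pfx = true ↔ ∀ j, j < cs.length → pvDsum (cs.drop j) ≤ 0) := by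
  intro cs
  induction cs with
  | nil => intro pfx T h; simp [loopB]
  | cons c rest ih =>
    intro pfx T h
    have hsum : pvDsum (c :: rest) = pvDelta c + pvDsum rest := by
      simp [pvDsum]
    by_cases hc : T - pfx > 0
    · simp only [loopB, hc, if_pos]
      constructor
      · intro h'; cases h'
      · intro h'
        have := h' 0 (by simp)
        simp only [List.drop_zero] at this
        omega
    · simp only [loopB, hc, if_neg, not_false_iff]
      rw [ih (pfx + pvDelta c) T (by omega)]
      constructor
      · intro h' j hj
        match j with
        | 0 =>
          simp only [List.drop_zero]
          omega
        | j + 1 =>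
          simp only [List.drop_succ_cons]
          exact h' j (by simpa using hj)
      · intro h' j hj
        have := h' (j + 1) (by simpa using hj)
        simpa using this

-- ===== VERDICT (by name: the statement is the Claim_ definition above) =====
theorem bool_fun_spec : Claim_equal_bool_fun := by
  unfold Claim_equal_bool_fun
  intro s _
  unfold Spec_bool_fun bool_fun bool_fun_alt
  rw [loopA_eq_loopA']
  have hz : (0 : Int) - 0 = 0 := by norm_num
  rw [hz]
  rw [Bool.eq_iff_iff]
  rw [charA s.toList 0,
      charB s.toList 0 ((s.toList.map pvDelta).sum) (by simp [pvDsum])]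
  constructor
  · intro h j hj; have := h j hj; omega
  · intro h j hj; have := h j hj; omega
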